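-- pv_equiv track=rewrite | github.com/shreshthv90/WordGame | dictionary_fix_verification_test.py | is_reasonable_expanded_word
-- ===== SOURCE A (Python) =====
-- def is_reasonable_expanded_word(word):
--     """Enhanced heuristic validation for expanded dictionary"""
--     # Reject obvious invalid patterns
--     if len(set(word)) == 1:  # All same letter
--         return False
--
--     # Reject test patterns
--     if word in ['XXXX', 'XXXXX', 'XXXXXX', 'QQQQ', 'QQQQQ', 'QQQQQQ', 'ZZZZ', 'ZZZZZ', 'ZZZZZZ']:
--         return False
--
--     # Must have at least one vowel for 4+ letter words
--     vowels = set('AEIOUY')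
--     if len(word) >= 4 and not any(c in vowels for c in word):
--         return False
--
--     # Check for reasonable consonant patterns
--     consonants = set('BCDFGHJKLMNPQRSTVWXZ')
--     consonant_run = 0
--     for c in word:
--         if c in consonants:
--             consonant_run += 1
--             if consonant_run > 3:  # Too many consonants in a row
--                 return False
--         else:
--             consonant_run = 0
--
--     # If it passes basic checks, likely valid in expanded dictionary
--     return True
-- ===== SOURCE B (Python) =====
-- def is_reasonable_expanded_word(word):
--     # All same letter
--     if len(set(word)) == 1:
--         return False
--     # Must have at least one vowel for 4+ letter words
--     if len(word) >= 4 and not any(c in 'AEIOUY' for c in word):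
--         return False
--     # Reject four (or more) consecutive consonants: single sliding-window pass
--     cons = set('BCDFGHJKLMNPQRSTVWXZ')
--     flags = [c in cons for c in word]
--     return not any(a and b and c and d
--                    for a, b, c, d in zip(flags, flags[1:], flags[2:], flags[3:]))
-- ===== Notes on version B (the rewrite author's own statement) =====
-- stated objective: simpler
-- what changed: Drops the test-pattern list (every entry is a single repeated letter, already rejected by the first guard) and replaces the stateful consonant-run counter with a stateless sliding-window check (zip of four shifted flag lists) for four consecutive consonants.
import Mathlib
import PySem

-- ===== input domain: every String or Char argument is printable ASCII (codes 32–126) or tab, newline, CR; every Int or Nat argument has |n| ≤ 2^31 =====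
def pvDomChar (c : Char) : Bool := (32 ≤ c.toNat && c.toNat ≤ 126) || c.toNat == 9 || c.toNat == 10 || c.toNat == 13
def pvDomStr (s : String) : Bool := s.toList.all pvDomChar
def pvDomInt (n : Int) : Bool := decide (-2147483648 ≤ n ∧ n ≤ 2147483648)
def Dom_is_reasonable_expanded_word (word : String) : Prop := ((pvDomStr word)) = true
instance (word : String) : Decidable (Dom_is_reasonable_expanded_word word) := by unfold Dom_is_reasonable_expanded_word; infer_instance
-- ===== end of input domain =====

-- B drops A's redundant test-pattern list and replaces the run counter with a sliding-window
-- scan; objective: simpler. Behaviour is identical (the claim below is exact equivalence).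

-- ===== PORT A =====
-- c in set('BCDFGHJKLMNPQRSTVWXZ')
def pvConsA (c : Char) : Bool := (PySem.Set.ofList "BCDFGHJKLMNPQRSTVWXZ".toList).contains c
-- c in set('AEIOUY')
def pvVowelA (c : Char) : Bool := (PySem.Set.ofList "AEIOUY".toList).contains c
-- the for-loop over word with the consonant_run counter (early return False = result false)
def pvLoopA : List Char → Nat → Bool
  | [], _ => true
  | c :: t, run =>
    if pvConsA c then
      if run + 1 > 3 then false else pvLoopA t (run + 1)
    else pvLoopA t 0

def is_reasonable_expanded_word (word : String) : Bool :=
  let chars := word.toList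
  -- len(set(word)) == 1
  if (PySem.Set.ofList chars).length == 1 then false
  -- word in ['XXXX', …]
  else if (["XXXX","XXXXX","XXXXXX","QQQQ","QQQQQ","QQQQQQ","ZZZZ","ZZZZZ","ZZZZZZ"] : List String).contains word then false
  -- len(word) >= 4 and not any(c in vowels for c in word)
  else if chars.length ≥ 4 && !(chars.any pvVowelA) then false
  else pvLoopA chars 0

-- ===== PORT B =====
-- c in 'AEIOUY' (single-char membership in the string)
def pvVowelB (c : Char) : Bool := "AEIOUY".toList.contains c
-- c in set('BCDFGHJKLMNPQRSTVWXZ')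
def pvConsB (c : Char) : Bool := (PySem.Set.ofList "BCDFGHJKLMNPQRSTVWXZ".toList).contains c
-- hand port (exact): any(a and b and c and d for a,b,c,d in zip(flags, flags[1:], flags[2:], flags[3:]))
-- zip truncates at the shortest list, so exactly the windows of length 4 are examined, in order.
def pvWin4 : List Bool → Bool
  | a :: b :: c :: d :: t => (a && b && c && d) || pvWin4 (b :: c :: d :: t)
  | _ => false

def is_reasonable_expanded_word_alt (word : String) : Bool :=
  let chars := word.toList
  if (PySem.Set.ofList chars).length == 1 then false
  else if chars.length ≥ 4 && !(chars.any pvVowelB) then false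
  else !pvWin4 (chars.map pvConsB)

-- ===== PRECONDITION & SPEC =====
def Spec_is_reasonable_expanded_word (word : String) (out : Bool) : Prop := out = is_reasonable_expanded_word_alt word
instance (word : String) (out : Bool) : Decidable (Spec_is_reasonable_expanded_word word out) := by unfold Spec_is_reasonable_expanded_word; infer_instance

-- ===== CLAIM (what is proved, stated in full; the proofs are below) =====
def Claim_equal_is_reasonable_expanded_word : Prop := ∀ (word : String), Dom_is_reasonable_expanded_word word → Spec_is_reasonable_expanded_word word (is_reasonable_expanded_word word)

-- ===== LEMMAS AND PROOFS =====

-- windows over at most three trues followed by a false reduce to windows of the tail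
theorem pvWin4_false_cons (xs : List Bool) : pvWin4 (false :: xs) = pvWin4 xs := by
  match xs with
  | a :: b :: c :: t => simp [pvWin4]
  | [] => simp [pvWin4]
  | [a] => simp [pvWin4]
  | [a, b] => simp [pvWin4]

theorem pvWin4_tf (xs : List Bool) : pvWin4 (true :: false :: xs) = pvWin4 xs := by
  match xs with
  | a :: b :: t => simp [pvWin4, pvWin4_false_cons]
  | [] => simp [pvWin4]
  | [a] => simp [pvWin4]

theorem pvWin4_ttf (xs : List Bool) : pvWin4 (true :: true :: false :: xs) = pvWin4 xs := by
  match xs with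
  | a :: t => simp [pvWin4, pvWin4_tf]
  | [] => simp [pvWin4]

theorem pvWin4_tttf (xs : List Bool) : pvWin4 (true :: true :: true :: false :: xs) = pvWin4 xs := by
  simp [pvWin4, pvWin4_ttf]

theorem pvWin4_repl_false (r : Nat) (hr : r ≤ 3) (xs : List Bool) :
    pvWin4 (List.replicate r true ++ false :: xs) = pvWin4 xs := by
  interval_cases r
  · simpa using pvWin4_false_cons xs
  · simpa [List.replicate] using pvWin4_tf xs
  · simpa [List.replicate] using pvWin4_ttf xs
  · simpa [List.replicate] using pvWin4_tttf xs

theorem pvReplShift (r : Nat) (xs : List Bool) :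
    List.replicate r true ++ true :: xs = List.replicate (r + 1) true ++ xs := by
  induction r with
  | zero => simp
  | succ n ih => simp [List.replicate_succ, List.cons_append, ih]

-- the run-counter loop equals the sliding-window check, with r pending trailing consonants
theorem pvLoopA_eq_win (l : List Char) : ∀ r : Nat, r ≤ 3 →
    pvLoopA l r = !pvWin4 (List.replicate r true ++ l.map pvConsA) := by
  induction l with
  | nil =>
    intro r hr
    interval_cases r <;> simp [pvLoopA, pvWin4, List.replicate]
  | cons c t ih =>
    intro r hr
    by_cases hc : pvConsA c = true
    · by_cases h3 : r = 3
      · subst h3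
        simp [pvLoopA, hc, pvWin4, List.replicate]
      · have hstep : pvLoopA (c :: t) r = pvLoopA t (r + 1) := by
          simp only [pvLoopA, hc, if_true]
          rw [if_neg (by omega)]
        rw [hstep, ih (r + 1) (by omega), List.map_cons, hc, pvReplShift]
    · have hc' : pvConsA c = false := by simpa using hc
      have hstep : pvLoopA (c :: t) r = pvLoopA t 0 := by
        simp [pvLoopA, hc]
      rw [hstep, ih 0 (by omega), List.map_cons, hc']
      simp [pvWin4_repl_false r hr]

theorem pvCons_eq : pvConsA = pvConsB := rfl

theorem pvVowel_eq : pvVowelA = pvVowelB := by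
  funext c
  rfl

-- ===== VERDICT (by name: the statement is the Claim_ definition above) =====
theorem is_reasonable_expanded_word_spec : Claim_equal_is_reasonable_expanded_word := by
  intro word _
  unfold Spec_is_reasonable_expanded_word is_reasonable_expanded_word is_reasonable_expanded_word_alt
  by_cases h1 : (PySem.Set.ofList word.toList).length == 1
  · simp [h1]
  · by_cases h2 : (["XXXX","XXXXX","XXXXXX","QQQQ","QQQQQ","QQQQQQ","ZZZZ","ZZZZZ","ZZZZZZ"] : List String).contains word
    · exfalso
      apply h1
      have hm : word ∈ (["XXXX","XXXXX","XXXXXX","QQQQ","QQQQQ","QQQQQQ","ZZZZ","ZZZZZ","ZZZZZZ"] : List String) := by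
        simpa using h2
      fin_cases hm <;> decide
    · simp only [h1, h2, if_false, Bool.false_eq_true, pvVowel_eq, ← pvCons_eq]
      rw [pvLoopA_eq_win word.toList 0 (by omega)]
      simp
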